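-- pv_equiv track=rewrite | github.com/tuner/genome-explorer | utils/compressRefGene.py | zipExons
-- ===== SOURCE A (Python) =====
-- def zipExons(reference, exonStarts, exonEnds):
--     s = [int(x) for x in exonStarts.split(",") if x != '']
--     e = [int(x) for x in exonEnds.split(",") if x != '']
--
--     a = []
--
--     for i in range(0, len(s)):
--         delta = s[i] - reference
--         a.append(delta)
--         reference = reference + delta
--
--         delta = e[i] - reference
--         a.append(delta)
--         reference = reference + delta
--
--     return a;
-- ===== SOURCE B (Python) =====
-- def zipExons(reference, exonStarts, exonEnds):
--     s = [int(x) for x in exonStarts.split(",") if x != '']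
--     e = [int(x) for x in exonEnds.split(",") if x != '']
--     seq = [reference]
--     for i in range(len(s)):
--         seq.append(s[i])
--         seq.append(e[i])
--     return [seq[j + 1] - seq[j] for j in range(len(seq) - 1)]
-- ===== Notes on version B (the rewrite author's own statement) =====
-- stated objective: simpler
-- what changed: Replaces the fused delta loop that mutates a running reference with a two-phase decomposition: first build the flat absolute-coordinate sequence [reference, s0, e0, s1, e1, ...], then return its consecutive differences.
import Mathlib
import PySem

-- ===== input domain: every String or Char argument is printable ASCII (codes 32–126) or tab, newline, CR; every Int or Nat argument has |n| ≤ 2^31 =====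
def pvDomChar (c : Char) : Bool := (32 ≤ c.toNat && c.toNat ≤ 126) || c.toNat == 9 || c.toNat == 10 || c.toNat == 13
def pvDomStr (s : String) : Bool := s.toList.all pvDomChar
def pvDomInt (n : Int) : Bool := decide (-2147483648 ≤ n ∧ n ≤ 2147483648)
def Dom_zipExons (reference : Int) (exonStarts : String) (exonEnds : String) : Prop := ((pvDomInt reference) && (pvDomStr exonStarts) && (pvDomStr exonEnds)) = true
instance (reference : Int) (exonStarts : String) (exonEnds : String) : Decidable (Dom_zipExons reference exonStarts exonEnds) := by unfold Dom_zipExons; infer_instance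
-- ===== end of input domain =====

-- B replaces A's fused running-reference delta loop by a two-phase decomposition
-- (build the flat absolute-coordinate sequence, then take consecutive differences);
-- objective: simpler.

-- ===== PORT A =====
-- shared helper: `[int(x) for x in str.split(",") if x != '']` (identical line in both Pythons);
-- `.getD 0` is only reached outside Pre_ (where Python raises ValueError)
def pvParse (str : String) : List Int :=
  ((PySem.Chars.splitOn str.toList [',']).filter (fun x => x ≠ [])).map
    (fun x => (PySem.Int.ofChars? x).getD 0)

def zipExons (reference : Int) (exonStarts : String) (exonEnds : String) : List Int :=
  let s := pvParse exonStarts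
  let e := pvParse exonEnds
  ((PySem.List.pyRange 0 (s.length : Int) 1).foldl
    (fun (st : List Int × Int) i =>
      let delta := PySem.List.pyGetD s i 0 - st.2
      let a := st.1 ++ [delta]
      let ref := st.2 + delta
      let delta2 := PySem.List.pyGetD e i 0 - ref
      (a ++ [delta2], ref + delta2))
    ([], reference)).1

-- ===== PORT B =====
def zipExons_alt (reference : Int) (exonStarts : String) (exonEnds : String) : List Int :=
  let s := pvParse exonStarts
  let e := pvParse exonEnds
  let seq := (PySem.List.pyRange 0 (s.length : Int) 1).foldl
    (fun seq i => seq ++ [PySem.List.pyGetD s i 0] ++ [PySem.List.pyGetD e i 0]) [reference]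
  (PySem.List.pyRange 0 ((seq.length : Int) - 1) 1).map
    (fun j => PySem.List.pyGetD seq (j + 1) 0 - PySem.List.pyGetD seq j 0)

-- ===== PRECONDITION & SPEC =====
-- Pre_ excludes exactly the inputs where A raises: a non-empty comma piece that int() rejects
-- (ValueError), or fewer end coordinates than start coordinates (IndexError on e[i]).
def Pre_zipExons (reference : Int) (exonStarts : String) (exonEnds : String) : Prop :=
  (∀ x ∈ (PySem.Chars.splitOn exonStarts.toList [',']).filter (fun x => x ≠ []), (PySem.Int.ofChars? x).isSome) ∧
  (∀ x ∈ (PySem.Chars.splitOn exonEnds.toList [',']).filter (fun x => x ≠ []), (PySem.Int.ofChars? x).isSome) ∧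
  ((PySem.Chars.splitOn exonStarts.toList [',']).filter (fun x => x ≠ [])).length ≤
    ((PySem.Chars.splitOn exonEnds.toList [',']).filter (fun x => x ≠ [])).length

instance (reference : Int) (exonStarts : String) (exonEnds : String) : Decidable (Pre_zipExons reference exonStarts exonEnds) := by unfold Pre_zipExons; infer_instance

def pvWitness_zipExons : Int × String × String := (10, "12,20", "15,25")

def Spec_zipExons (reference : Int) (exonStarts : String) (exonEnds : String) (out : List Int) : Prop := out = zipExons_alt reference exonStarts exonEnds
instance (reference : Int) (exonStarts : String) (exonEnds : String) (out : List Int) : Decidable (Spec_zipExons reference exonStarts exonEnds out) := by unfold Spec_zipExons; infer_instance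

-- ===== CLAIM (what is proved, stated in full; the proofs are below) =====
def Claim_equal_zipExons : Prop := ∀ (reference : Int) (exonStarts : String) (exonEnds : String), Dom_zipExons reference exonStarts exonEnds → Pre_zipExons reference exonStarts exonEnds → Spec_zipExons reference exonStarts exonEnds (zipExons reference exonStarts exonEnds)

-- ===== LEMMAS AND PROOFS =====

/-- consecutive differences of a list -/
def pvDiffs : List Int → List Int
  | x :: y :: t => (y - x) :: pvDiffs (y :: t)
  | _ => []

theorem pvDiffs_append_two (l : List Int) (x a b : Int) :
    pvDiffs ((x :: l) ++ [a, b]) = pvDiffs (x :: l) ++ [a - (x :: l).getLastD 0, b - a] := by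
  induction l generalizing x with
  | nil => simp [pvDiffs]
  | cons y t ih => simpa [pvDiffs] using ih y

theorem pvDiffs_eq_map_aux (l : List Int) :
    (List.range (l.length - 1)).map (fun k => l.getD (k + 1) 0 - l.getD k 0) = pvDiffs l := by
  induction l with
  | nil => simp [pvDiffs]
  | cons x t ih =>
    match t with
    | [] => simp [pvDiffs]
    | y :: t' =>
      simp only [List.length_cons, Nat.add_sub_cancel] at ih ⊢
      rw [List.range_succ_eq_map, List.map_cons, List.map_map]
      rw [show pvDiffs (x :: y :: t') = (y - x) :: pvDiffs (y :: t') from rfl]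
      congr 1

theorem pvDiffs_eq_map (l : List Int) :
    (PySem.List.pyRange 0 ((l.length : Int) - 1) 1).map
      (fun j => PySem.List.pyGetD l (j + 1) 0 - PySem.List.pyGetD l j 0) = pvDiffs l := by
  rw [PySem.List.pyRange_one, List.map_map, ← pvDiffs_eq_map_aux l]
  have hlen : ((l.length : Int) - 1 - 0).toNat = l.length - 1 := by omega
  rw [hlen]
  apply List.map_congr_left
  intro k _
  have h1 : ((k : Nat) : Int) + 1 = ((k + 1 : Nat) : Int) := by push_cast; ring
  rw [Function.comp_apply, zero_add, h1, PySem.List.pyGetD_natCast, PySem.List.pyGetD_natCast]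

/-- the absolute-coordinate tail `[s0, e0, …, s(n-1), e(n-1)]` -/
def pvTail (s e : List Int) (n : Nat) : List Int :=
  (PySem.List.pyRange 0 (n : Int) 1).flatMap
    (fun i => [PySem.List.pyGetD s i 0, PySem.List.pyGetD e i 0])

theorem pvTail_succ (s e : List Int) (n : Nat) :
    pvTail s e (n + 1) = pvTail s e n ++ [PySem.List.pyGetD s (n : Int) 0, PySem.List.pyGetD e (n : Int) 0] := by
  unfold pvTail
  rw [show ((n + 1 : Nat) : Int) = (n : Int) + 1 by push_cast; ring,
      PySem.List.pyRange_one_succ_right (by positivity)]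
  simp

/-- B's sequence-building loop computes `reference :: pvTail` -/
theorem pv_seq (s e : List Int) (n : Nat) (ref : Int) :
    (PySem.List.pyRange 0 (n : Int) 1).foldl
      (fun seq i => seq ++ [PySem.List.pyGetD s i 0] ++ [PySem.List.pyGetD e i 0]) [ref]
    = ref :: pvTail s e n := by
  induction n with
  | zero => simp [pvTail, PySem.List.pyRange_one_eq_nil]
  | succ m ih =>
    rw [show ((m + 1 : Nat) : Int) = (m : Int) + 1 by push_cast; ring,
        PySem.List.pyRange_one_succ_right (by positivity), List.foldl_append, ih, pvTail_succ]
    simp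

/-- A's fused loop computes the consecutive differences, and its running reference
    is the last absolute coordinate -/
theorem pv_loop (s e : List Int) (n : Nat) : ∀ (acc : List Int) (ref : Int),
    (PySem.List.pyRange 0 (n : Int) 1).foldl
      (fun (st : List Int × Int) i =>
        let delta := PySem.List.pyGetD s i 0 - st.2
        let a := st.1 ++ [delta]
        let ref := st.2 + delta
        let delta2 := PySem.List.pyGetD e i 0 - ref
        (a ++ [delta2], ref + delta2))
      (acc, ref)
    = (acc ++ pvDiffs (ref :: pvTail s e n), (ref :: pvTail s e n).getLastD 0) := by
  induction n with
  | zero => intro acc ref; simp [pvTail, PySem.List.pyRange_one_eq_nil, pvDiffs]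
  | succ m ih =>
    intro acc ref
    rw [show ((m + 1 : Nat) : Int) = (m : Int) + 1 by push_cast; ring,
        PySem.List.pyRange_one_succ_right (by positivity), List.foldl_append, ih, pvTail_succ]
    simp only [List.foldl_cons, List.foldl_nil]
    rw [show (ref :: (pvTail s e m ++ [PySem.List.pyGetD s (m : Int) 0, PySem.List.pyGetD e (m : Int) 0]))
          = (ref :: pvTail s e m) ++ [PySem.List.pyGetD s (m : Int) 0, PySem.List.pyGetD e (m : Int) 0] by simp,
        pvDiffs_append_two, Prod.mk.injEq]
    refine ⟨?_, ?_⟩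
    · simp only [List.append_assoc, List.cons_append, List.nil_append]
      congr 3
      congr 1
      ring
    · simp only [List.getLastD_eq_getLast?]
      rw [List.getLast?_append]
      simp

-- ===== VERDICT (by name: the statement is the Claim_ definition above) =====
theorem zipExons_spec : Claim_equal_zipExons := by
  intro reference exonStarts exonEnds _ _
  show zipExons reference exonStarts exonEnds = zipExons_alt reference exonStarts exonEnds
  simp only [zipExons, zipExons_alt]
  rw [pv_seq, pv_loop, pvDiffs_eq_map]
  rfl
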